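-- pv_equiv track=rewrite | github.com/erdenebayrd/leetcode | 0914-x-of-a-kind-in-a-deck-of-cards/0914-x-of-a-kind-in-a-deck-of-cards.py | hasGroupsSizeX
-- ===== SOURCE A (Python) =====
-- from typing import List
--
-- from math import gcd
-- from collections import Counter
--
-- def hasGroupsSizeX(deck: List[int]) -> bool:
--     # [1, 1, 1, 1, 1, 1, 5, 5, 5, 5, 5, 5, 5, 5, 5 ]
--     # 1: 6
--     # 5: 9
--     # x = 3, [111], [111], [555], [555], [555]
--
--     # tc: O(N + K * log M) N number of elements in deck, K is number of unique elements, M is maximum counted value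
--     # sc: O(K)
--     if len(deck) == 0:
--         return False
--
--     counter = Counter(deck)
--     greatestCommonDivisor = 0
--     for _, count in counter.items():
--         greatestCommonDivisor = gcd(greatestCommonDivisor, count)
--     return greatestCommonDivisor > 1
-- ===== SOURCE B (Python) =====
-- from typing import List
-- from collections import Counter
--
-- def hasGroupsSizeX(deck: List[int]) -> bool:
--     # Divisor search: try every candidate group size x from 2 up to the
--     # smallest count; succeed iff some x divides all counts.
--     if not deck:
--         return False
--     counts = list(Counter(deck).values())
--     m = min(counts)
--     for x in range(2, m + 1):
--         if all(c % x == 0 for c in counts):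
--             return True
--     return False
-- ===== Notes on version B (the rewrite author's own statement) =====
-- stated objective: alternative
-- what changed: Replaces the gcd fold over the Counter values with an explicit divisor search: try each candidate group size x from 2 to min(counts) and test whether x divides every count.
import Mathlib
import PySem

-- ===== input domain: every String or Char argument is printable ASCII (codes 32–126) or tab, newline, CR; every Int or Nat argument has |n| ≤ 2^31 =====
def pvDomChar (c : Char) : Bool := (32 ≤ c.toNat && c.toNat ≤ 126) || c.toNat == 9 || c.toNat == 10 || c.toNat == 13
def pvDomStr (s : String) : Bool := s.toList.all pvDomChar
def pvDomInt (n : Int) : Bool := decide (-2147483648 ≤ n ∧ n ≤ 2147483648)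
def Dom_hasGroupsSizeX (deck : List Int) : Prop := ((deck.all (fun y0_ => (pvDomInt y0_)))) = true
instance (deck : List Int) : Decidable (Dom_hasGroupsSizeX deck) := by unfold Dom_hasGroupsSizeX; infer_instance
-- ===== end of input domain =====

-- B replaces A's gcd fold with a divisor search over candidate group sizes 2..min(counts);
-- same results, no speed claim (objective: alternative).

-- ===== PORT A =====
-- math.gcd on ints = gcd of absolute values, nonnegative result = Int.gcd cast back to Int
def pyGcd (a b : Int) : Int := (Int.gcd a b : Int)

def hasGroupsSizeX (deck : List Int) : Bool :=
  if deck.length == 0 then false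
  else
    let counter := PySem.Dict.counter deck
    let greatestCommonDivisor :=
      counter.items.foldl (fun g kv => pyGcd g kv.2) 0
    decide (greatestCommonDivisor > 1)

-- ===== PORT B =====
def hasGroupsSizeX_alt (deck : List Int) : Bool :=
  if deck.isEmpty then false
  else
    let counts := (PySem.Dict.counter deck).values
    match PySem.List.min? counts (fun c => c) with
    | none => false   -- unreachable: counts nonempty when deck nonempty
    | some m =>
      (PySem.List.pyRange 2 (m + 1) 1).any
        (fun x => counts.all (fun c => PySem.Int.mod c x == 0))

-- ===== PRECONDITION & SPEC =====
def Spec_hasGroupsSizeX (deck : List Int) (out : Bool) : Prop := out = hasGroupsSizeX_alt deck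
instance (deck : List Int) (out : Bool) : Decidable (Spec_hasGroupsSizeX deck out) := by unfold Spec_hasGroupsSizeX; infer_instance

-- ===== CLAIM (what is proved, stated in full; the proofs are below) =====
def Claim_equal_hasGroupsSizeX : Prop := ∀ (deck : List Int), Dom_hasGroupsSizeX deck → Spec_hasGroupsSizeX deck (hasGroupsSizeX deck)

-- ===== LEMMAS AND PROOFS =====

-- the gcd fold over Ints, done in ℕ (proof helper)
def natFold (l : List Int) (n : ℕ) : ℕ := l.foldl (fun g c => Nat.gcd g c.natAbs) n

-- the gcd fold over Ints is the gcd fold over Nats (natAbs), cast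
theorem foldGcd_eq_nat (l : List Int) (n : ℕ) :
    l.foldl (fun g c => pyGcd g c) (n : Int) = (natFold l n : Int) := by
  induction l generalizing n with
  | nil => rfl
  | cons c t ih =>
    have h : pyGcd (n : Int) c = ((Nat.gcd n c.natAbs : ℕ) : Int) := by
      simp [pyGcd, Int.gcd]
    rw [List.foldl_cons, h, ih]
    rfl

theorem foldGcd_dvd (l : List Int) (n : ℕ) :
    natFold l n ∣ n ∧ ∀ c ∈ l, natFold l n ∣ c.natAbs := by
  induction l generalizing n with
  | nil => simp [natFold]
  | cons c t ih =>
    obtain ⟨h1, h2⟩ := ih (Nat.gcd n c.natAbs)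
    refine ⟨h1.trans (Nat.gcd_dvd_left _ _), ?_⟩
    intro d hd
    rcases List.mem_cons.1 hd with rfl | hd'
    · exact h1.trans (Nat.gcd_dvd_right _ _)
    · exact h2 _ hd'

theorem dvd_foldGcd (l : List Int) (n d : ℕ) (hn : d ∣ n)
    (h : ∀ c ∈ l, d ∣ c.natAbs) : d ∣ natFold l n := by
  induction l generalizing n with
  | nil => exact hn
  | cons c t ih =>
    exact ih _ (Nat.dvd_gcd hn (h c (List.mem_cons_self))) (fun c hc => h c (List.mem_cons_of_mem _ hc))

-- every value of Counter(deck) is a positive count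
theorem counts_pos (deck : List Int) :
    ∀ c ∈ (PySem.Dict.counter deck).values, 1 ≤ c := by
  intro c hc
  have : (PySem.Dict.counter deck).values
      = ((PySem.Set.ofList deck).map (fun k => (k, (deck.count k : Int)))).map (·.2) := by
    show (PySem.Dict.counter deck).items.map (·.2) = _
    rw [PySem.Dict.items_counter]
  rw [this] at hc
  obtain ⟨p, hp, rfl⟩ := List.mem_map.1 hc
  obtain ⟨k, hk, rfl⟩ := List.mem_map.1 hp
  have hk' : k ∈ deck := (PySem.Set.mem_ofList _ _).1 hk
  have h1 : 1 ≤ deck.count k := List.count_pos_iff.2 hk'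
  show (1 : Int) ≤ (deck.count k : Int)
  exact_mod_cast h1

theorem counts_ne_nil (deck : List Int) (h : deck ≠ []) :
    (PySem.Dict.counter deck).values ≠ [] := by
  cases deck with
  | nil => exact absurd rfl h
  | cons a t =>
    intro hv
    have : a ∈ PySem.Set.ofList (a :: t) := (PySem.Set.mem_ofList _ _).2 (List.mem_cons_self)
    have hmem : (a, ((a :: t).count a : Int)) ∈ (PySem.Dict.counter (a :: t)).items := by
      rw [PySem.Dict.items_counter]
      exact List.mem_map.2 ⟨a, this, rfl⟩
    have : ((a :: t).count a : Int) ∈ (PySem.Dict.counter (a :: t)).values :=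
      List.mem_map.2 ⟨_, hmem, rfl⟩
    rw [hv] at this
    exact (List.not_mem_nil) this

-- ===== VERDICT (by name: the statement is the Claim_ definition above) =====
theorem hasGroupsSizeX_spec : Claim_equal_hasGroupsSizeX := by
  intro deck _
  unfold Spec_hasGroupsSizeX hasGroupsSizeX hasGroupsSizeX_alt
  by_cases hd : deck = []
  · subst hd; rfl
  · simp only [List.isEmpty_iff, hd, List.length_eq_zero_iff, beq_iff_eq]
    set counts := (PySem.Dict.counter deck).values with hcounts
    have hpos := counts_pos deck
    have hne := counts_ne_nil deck hd
    -- A's fold over items = fold over values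
    have hfoldA : (PySem.Dict.counter deck).items.foldl (fun g kv => pyGcd g kv.2) 0
        = counts.foldl (fun g c => pyGcd g c) 0 := by
      rw [hcounts]
      show _ = ((PySem.Dict.counter deck).items.map (·.2)).foldl (fun g c => pyGcd g c) 0
      rw [List.foldl_map]
    rw [hfoldA]
    have h0 : (0 : Int) = ((0 : ℕ) : Int) := rfl
    rw [h0, foldGcd_eq_nat]
    set N := natFold counts 0 with hN
    obtain ⟨-, hNdvd⟩ := foldGcd_dvd counts 0
    rw [← hN] at hNdvd
    -- min exists
    obtain ⟨m, hm⟩ : ∃ m, PySem.List.min? counts (fun c => c) = some m := by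
      cases hmo : PySem.List.min? counts (fun c => c) with
      | none => exact absurd ((PySem.List.min?_eq_none_iff _ _).1 hmo) hne
      | some m => exact ⟨m, rfl⟩
    rw [hm]
    have hmmem : m ∈ counts := PySem.List.min?_mem hm
    have hmin : ∀ c ∈ counts, m ≤ c := fun c hc => PySem.List.min?_isMin hm c hc
    have hm1 : 1 ≤ m := hpos m hmmem
    -- N ≠ 0
    have hNne : N ≠ 0 := by
      intro h0'
      have := hNdvd m hmmem
      rw [h0'] at this
      have := Nat.eq_zero_of_zero_dvd this
      omega
    rcases Nat.lt_or_ge N 2 with hNlt | hNge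
    · -- N ≤ 1 : A gives false; show no divisor works
      have hA : decide ((N : Int) > 1) = false := by
        simp only [decide_eq_false_iff_not, not_lt]
        exact_mod_cast Nat.le_of_lt_succ hNlt
      rw [hA]
      symm
      show ((PySem.List.pyRange 2 (m + 1) 1).any
        (fun x => counts.all (fun c => PySem.Int.mod c x == 0))) = false
      rw [List.any_eq_false]
      intro x hx
      rw [PySem.List.mem_pyRange_one] at hx
      simp only [List.all_eq_true, beq_iff_eq, not_forall]
      -- if x divided everything, x.natAbs would divide N, so N ≥ x ≥ 2
      by_contra hall
      push Not at hall
      have hxdvd : ∀ c ∈ counts, x.natAbs ∣ c.natAbs := by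
        intro c hc
        have := (PySem.Int.mod_eq_zero_iff_dvd c x).1 (hall c hc)
        exact Int.natAbs_dvd_natAbs.2 this
      have : x.natAbs ∣ N := dvd_foldGcd counts 0 x.natAbs (dvd_zero _) hxdvd
      have hxa : 2 ≤ x.natAbs := by omega
      have := Nat.le_of_dvd (Nat.pos_of_ne_zero hNne) this
      omega
    · -- N ≥ 2 : A gives true; x = N works
      have hA : decide ((N : Int) > 1) = true := by
        simp only [decide_eq_true_eq]
        exact_mod_cast hNge
      rw [hA]
      symm
      show ((PySem.List.pyRange 2 (m + 1) 1).any
        (fun x => counts.all (fun c => PySem.Int.mod c x == 0))) = true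
      rw [List.any_eq_true]
      refine ⟨(N : Int), ?_, ?_⟩
      · rw [PySem.List.mem_pyRange_one]
        constructor
        · exact_mod_cast hNge
        · -- N ∣ m.natAbs, m ≥ 1 so N ≤ m
          have hdm := hNdvd m hmmem
          have : N ≤ m.natAbs := Nat.le_of_dvd (by omega) hdm
          omega
      · simp only [List.all_eq_true, beq_iff_eq]
        intro c hc
        rw [PySem.Int.mod_eq_zero_iff_dvd]
        have := hNdvd c hc
        have hcpos := hpos c hc
        have : (N : Int) ∣ c.natAbs := Int.natCast_dvd_natCast.2 this
        rwa [Int.natAbs_of_nonneg (by omega)] at this
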